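-- pv_equiv track=rewrite | github.com/plilja/adventofcode | day19/day19.py | solve
-- ===== SOURCE A (Python) =====
-- def solve(transitions, molecule):
--     if transitions == []:
--         return set()
--     else:
--         (fr, to) = transitions[0]
--         i = molecule.find(fr, 0)
--         res = set()
--         while i != -1:
--             res |= {molecule[:i] + to + molecule[i + len(fr):]}
--             i = molecule.find(fr, i + 1)
--         return res | solve(transitions[1:], molecule)
-- ===== SOURCE B (Python) =====
-- def solve(transitions, molecule):
--     res = set()
--     n = len(molecule)
--     for (fr, to) in transitions:
--         k = len(fr)
--         for i in range(n + 1):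
--             if molecule[i:i+k] == fr:
--                 res.add(molecule[:i] + to + molecule[i+k:])
--     return res
-- ===== Notes on version B (the rewrite author's own statement) =====
-- stated objective: simpler
-- what changed: Replaced A's recursion over the transitions list with a find(fr, i)/advance-by-one while loop and per-level set unions by a single iterative accumulation into one set, scanning every position 0..len(molecule) and testing a slice comparison molecule[i:i+len(fr)] == fr.
import Mathlib
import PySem

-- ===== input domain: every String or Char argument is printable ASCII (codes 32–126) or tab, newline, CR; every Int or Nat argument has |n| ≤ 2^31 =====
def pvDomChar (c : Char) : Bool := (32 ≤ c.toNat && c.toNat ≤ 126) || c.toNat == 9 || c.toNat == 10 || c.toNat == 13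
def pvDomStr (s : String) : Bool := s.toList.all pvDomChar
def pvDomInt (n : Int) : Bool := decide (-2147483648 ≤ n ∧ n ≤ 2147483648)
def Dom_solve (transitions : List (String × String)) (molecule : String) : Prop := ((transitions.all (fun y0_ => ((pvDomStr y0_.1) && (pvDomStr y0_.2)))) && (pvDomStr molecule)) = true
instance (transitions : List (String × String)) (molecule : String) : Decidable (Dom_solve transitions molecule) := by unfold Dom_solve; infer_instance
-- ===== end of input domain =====

-- B replaces A's recursion over the transitions list (with a find-advance-by-one inner
-- while loop) by a single iterative accumulation into one set, scanning all positions
-- 0..len(molecule) with a slice comparison; objective: simpler, same result set.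

-- ===== PORT A =====
-- the 'while i != -1' loop of A; fuel bounds the iteration count (the loop runs at most
-- len(molecule)+1 times since the scan index strictly increases), it changes nothing else
def solveWhileA (mol fr dst : List Char) : Nat → Int → PySem.Set String → PySem.Set String
  | 0, _, res => res
  | fuel + 1, i, res =>
    if i = -1 then res
    else
      solveWhileA mol fr dst fuel (PySem.Chars.findFrom mol fr (i + 1))
        (PySem.Set.union res
          [String.ofList (PySem.Chars.slice mol none (some i) ++ dst ++
            PySem.Chars.slice mol (some (i + (fr.length : Int))) none)])

def solve (transitions : List (String × String)) (molecule : String) : List String :=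
  match transitions with
  | [] => PySem.Set.empty
  | (fr, dst) :: rest =>
    PySem.Set.union
      (solveWhileA molecule.toList fr.toList dst.toList (molecule.toList.length + 2)
        (PySem.Chars.find molecule.toList fr.toList) PySem.Set.empty)
      (solve rest molecule)

-- ===== PORT B =====
def solve_alt (transitions : List (String × String)) (molecule : String) : List String :=
  transitions.foldl
    (fun res p =>
      (List.range (molecule.toList.length + 1)).foldl
        (fun res (i : Nat) =>
          if PySem.Chars.slice molecule.toList (some (i : Int))
              (some ((i : Int) + (p.1.toList.length : Int))) = p.1.toList then
            PySem.Set.add res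
              (String.ofList (PySem.Chars.slice molecule.toList none (some (i : Int)) ++
                p.2.toList ++
                PySem.Chars.slice molecule.toList (some ((i : Int) + (p.1.toList.length : Int))) none))
          else res)
        res)
    PySem.Set.empty

-- ===== PRECONDITION & SPEC =====
def Spec_solve (transitions : List (String × String)) (molecule : String) (out : List String) : Prop := out = solve_alt transitions molecule
instance (transitions : List (String × String)) (molecule : String) (out : List String) : Decidable (Spec_solve transitions molecule out) := by unfold Spec_solve; infer_instance

-- ===== CLAIM (what is proved, stated in full; the proofs are below) =====
def Claim_equal_solve : Prop := ∀ (transitions : List (String × String)) (molecule : String), Dom_solve transitions molecule → Spec_solve transitions molecule (solve transitions molecule)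

-- ===== LEMMAS AND PROOFS =====

-- a pattern fr matches molecule mol at position j
def matchAt (mol fr : List Char) (j : Nat) : Bool := decide (fr <+: mol.drop j)

-- the replacement string produced at match position j (k = pattern length)
def repl (mol dst : List Char) (k j : Nat) : String :=
  String.ofList (mol.take j ++ dst ++ mol.drop (j + k))

-- all replacement strings of one transition, in position order
def occs (mol fr dst : List Char) : List String :=
  ((List.range' 0 (mol.length + 1)).filter (matchAt mol fr)).map (repl mol dst fr.length)

-- all replacement strings of all transitions, in A's/B's common insertion order
def allOccs (mol : List Char) (ts : List (String × String)) : List String :=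
  ts.flatMap (fun p => occs mol p.1.toList p.2.toList)

theorem findFrom_gt_len (s sub : List Char) (k : Nat) (h : s.length < k) :
    PySem.Chars.findFrom s sub (k : Int) none = -1 := by
  unfold PySem.Chars.findFrom
  simp only []
  have h1 : ¬ ((k : Int) < 0) := by omega
  rw [if_neg h1, if_pos (by exact_mod_cast h)]

theorem findFrom_le_len (s sub : List Char) (k : Nat) (h : k ≤ s.length) :
    PySem.Chars.findFrom s sub (k : Int) none ≤ (s.length : Int) := by
  unfold PySem.Chars.findFrom
  simp only []
  have h1 : ¬ ((k : Int) < 0) := by omega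
  rw [if_neg h1]
  split_ifs with h2 h3
  · omega
  · omega
  · have := PySem.Chars.find_le_length (List.drop (Int.toNat (k:Int)) (List.take (Int.toNat ((s.length:Nat):Int)) s)) sub
    simp at this ⊢
    omega

-- no match at any position in [k, mol.length] when findFrom = -1
theorem no_match_of_findFrom_neg (mol fr : List Char) (k : Nat) (hk : k ≤ mol.length)
    (h : PySem.Chars.findFrom mol fr (k : Int) none = -1) :
    ∀ j, k ≤ j → ¬ fr <+: mol.drop j := by
  intro j hj hpre
  rw [PySem.Chars.findFrom_natCast_eq_neg_one_iff mol fr k hk] at h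
  apply h
  rw [← PySem.Chars.isIn_iff_infix, ← PySem.Chars.exists_prefix_drop_iff_isIn]
  exact ⟨j - k, by rw [List.drop_drop, show k + (j - k) = j from by omega]; exact hpre⟩

theorem whileA_eq (mol fr dst : List Char) :
    ∀ (fuel k : Nat) (res : PySem.Set String), k ≤ mol.length + 1 →
      mol.length + 2 - k ≤ fuel →
      solveWhileA mol fr dst fuel (PySem.Chars.findFrom mol fr (k : Int)) res
        = ((List.range' k (mol.length + 1 - k)).filter (matchAt mol fr)).foldl
            (fun s j => PySem.Set.add s (repl mol dst fr.length j)) res := by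
  intro fuel
  induction fuel with
  | zero => intro k res hk hf; omega
  | succ fuel ih =>
    intro k res hk hf
    rcases Nat.lt_or_ge mol.length k with hgt | hle
    · -- k = mol.length + 1
      have hk1 : k = mol.length + 1 := by omega
      rw [findFrom_gt_len mol fr k hgt]
      simp [solveWhileA, hk1]
    · set m := PySem.Chars.findFrom mol fr (k : Int) with hm
      by_cases hneg : m = -1
      · rw [hneg]
        have hfil : (List.range' k (mol.length + 1 - k)).filter (matchAt mol fr) = [] := by
          rw [List.filter_eq_nil_iff]
          intro j hj
          have := List.mem_range'_1.mp hj
          simp only [matchAt, decide_eq_true_eq]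
          exact no_match_of_findFrom_neg mol fr k hle (hm ▸ hneg) j this.1
        rw [hfil]
        simp [solveWhileA]
      · obtain ⟨hkm, hpre, hmin⟩ := PySem.Chars.findFrom_natCast_spec mol fr k hle hneg
        rw [← hm] at hkm hpre hmin
        have hmle : m ≤ (mol.length : Int) := hm ▸ findFrom_le_len mol fr k hle
        have hm0 : 0 ≤ m := le_trans (by omega) hkm
        set M := m.toNat with hM
        have hmM : m = (M : Int) := by omega
        have hkM : k ≤ M := by omega
        have hMn : M ≤ mol.length := by omega
        -- LHS one step
        have step : solveWhileA mol fr dst (fuel + 1) m res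
            = solveWhileA mol fr dst fuel (PySem.Chars.findFrom mol fr (m + 1))
              (PySem.Set.add res (repl mol dst fr.length M)) := by
          rw [solveWhileA, if_neg hneg]
          congr 1
          have e1 : PySem.Chars.slice mol none (some m) = mol.take M := by
            rw [hmM]; simp [PySem.List.slice_to_natCast]
          have e2 : PySem.Chars.slice mol (some (m + (fr.length : Int))) none
              = mol.drop (M + fr.length) := by
            rw [hmM]
            have : (M : Int) + (fr.length : Int) = ((M + fr.length : Nat) : Int) := by push_cast; ring
            simp only [PySem.Chars.slice_eq_listSlice]
            rw [this]
            exact PySem.List.slice_from_natCast mol (M + fr.length)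
          rw [e1, e2]
          show List.foldl PySem.Set.add res [_] = _
          simp [PySem.Set.add, repl]
        rw [step]
        have hm1 : m + 1 = ((M + 1 : Nat) : Int) := by omega
        rw [hm1, ih (M + 1) _ (by omega) (by omega)]
        -- RHS split
        have h2 := (List.range'_append (s:=k) (m:=M - k) (n:=mol.length + 1 - M) (step:=1)).symm
        rw [show (M - k) + (mol.length + 1 - M) = mol.length + 1 - k from by omega] at h2
        have hsplit : List.range' k (mol.length + 1 - k)
            = List.range' k (M - k) ++ M :: List.range' (M + 1) (mol.length - M) := by
          rw [h2, show k + 1 * (M - k) = M from by omega,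
            show mol.length + 1 - M = (mol.length - M) + 1 from by omega, List.range'_succ]
        rw [hsplit, List.filter_append, List.foldl_append]
        have hfil1 : (List.range' k (M - k)).filter (matchAt mol fr) = [] := by
          rw [List.filter_eq_nil_iff]
          intro j hj
          have hmem := List.mem_range'_1.mp hj
          simp only [matchAt, decide_eq_true_eq]
          exact hmin j hmem.1 (by omega)
        have hfilM : (M :: List.range' (M + 1) (mol.length - M)).filter (matchAt mol fr)
            = M :: (List.range' (M + 1) (mol.length - M)).filter (matchAt mol fr) := by
          rw [List.filter_cons_of_pos (by simp only [matchAt, decide_eq_true_eq]; exact hpre)]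
        rw [hfil1, hfilM, show mol.length + 1 - (M + 1) = mol.length - M from by omega]
        simp

theorem update_ofList {α : Type} [BEq α] [LawfulBEq α] (s : PySem.Set α) (ys : List α) :
    PySem.Set.update s (PySem.Set.ofList ys) = PySem.Set.update s ys := by
  rw [PySem.Set.update_eq_append_filter, PySem.Set.update_eq_append_filter,
    PySem.Set.ofList_ofList]

-- one transition's inner while loop, from the initial find, collects exactly its occs
theorem perTrans_eq (mol fr dst : List Char) :
    solveWhileA mol fr dst (mol.length + 2) (PySem.Chars.find mol fr) PySem.Set.empty
      = PySem.Set.ofList (occs mol fr dst) := by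
  rw [← PySem.Chars.findFrom_zero]
  have h := whileA_eq mol fr dst (mol.length + 2) 0 PySem.Set.empty (by omega) (by omega)
  simp only [Nat.cast_zero, Nat.sub_zero] at h
  rw [h, occs, PySem.Set.ofList_eq_foldl, List.foldl_map]
  rfl

theorem solve_char (transitions : List (String × String)) (molecule : String) :
    solve transitions molecule = PySem.Set.ofList (allOccs molecule.toList transitions) := by
  induction transitions with
  | nil => rfl
  | cons p rest ih =>
    obtain ⟨fr, dst⟩ := p
    rw [show allOccs molecule.toList ((fr, dst) :: rest)
        = occs molecule.toList fr.toList dst.toList ++ allOccs molecule.toList rest from by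
      rw [allOccs, allOccs, List.flatMap_cons]]
    rw [PySem.Set.ofList_append, ← update_ofList, ← ih, solve, perTrans_eq]
    rfl

-- B's inner position scan over one transition equals updating with its occs
theorem innerB_eq (molecule : String) (fr dst : String) (res : PySem.Set String) :
    (List.range (molecule.toList.length + 1)).foldl
        (fun res (i : Nat) =>
          if PySem.Chars.slice molecule.toList (some (i : Int))
              (some ((i : Int) + (fr.toList.length : Int))) = fr.toList then
            PySem.Set.add res
              (String.ofList (PySem.Chars.slice molecule.toList none (some (i : Int)) ++
                dst.toList ++
                PySem.Chars.slice molecule.toList (some ((i : Int) + (fr.toList.length : Int))) none))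
          else res)
        res
      = PySem.Set.update res (occs molecule.toList fr.toList dst.toList) := by
  set mol := molecule.toList with hmol
  rw [occs, PySem.Set.update, List.foldl_map, List.foldl_filter, List.range_eq_range']
  congr 1
  funext res i
  have hcast : (i : Int) + (fr.toList.length : Int) = ((i + fr.toList.length : Nat) : Int) := by
    push_cast; ring
  have hcond : (PySem.Chars.slice mol (some (i : Int))
      (some ((i : Int) + (fr.toList.length : Int))) = fr.toList) ↔ matchAt mol fr.toList i = true := by
    rw [hcast]
    simp only [PySem.Chars.slice_eq_listSlice, matchAt, decide_eq_true_eq]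
    rw [show ((i + fr.toList.length : Nat) : Int) = (i : Int) + (fr.toList.length : Int) from hcast.symm]
    rw [PySem.List.slice_natCast_add]
    rw [List.prefix_iff_eq_take]
    exact eq_comm
  by_cases h : matchAt mol fr.toList i = true
  · rw [if_pos (hcond.mpr h), if_pos h]
    congr 1
    rw [repl]
    have e1 : PySem.Chars.slice mol none (some (i : Int)) = mol.take i := by
      simp [PySem.List.slice_to_natCast]
    have e2 : PySem.Chars.slice mol (some ((i : Int) + (fr.toList.length : Int))) none
        = mol.drop (i + fr.toList.length) := by
      simp only [PySem.Chars.slice_eq_listSlice]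
      rw [hcast]
      exact PySem.List.slice_from_natCast mol (i + fr.toList.length)
    rw [e1, e2]
  · rw [if_neg (fun hc => h (hcond.mp hc)), if_neg h]

theorem solve_alt_char (transitions : List (String × String)) (molecule : String) :
    solve_alt transitions molecule = PySem.Set.ofList (allOccs molecule.toList transitions) := by
  rw [solve_alt, ← PySem.Set.update_empty]
  generalize PySem.Set.empty = s
  induction transitions generalizing s with
  | nil => rw [List.foldl_nil, allOccs, List.flatMap_nil, PySem.Set.update_nil]
  | cons p rest ih =>
    rw [List.foldl_cons, innerB_eq molecule p.1 p.2 s, ih,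
      show allOccs molecule.toList (p :: rest)
        = occs molecule.toList p.1.toList p.2.toList ++ allOccs molecule.toList rest from by
      rw [allOccs, allOccs, List.flatMap_cons], PySem.Set.update_append]

-- ===== VERDICT (by name: the statement is the Claim_ definition above) =====
theorem solve_spec : Claim_equal_solve := by
  intro transitions molecule _
  unfold Spec_solve
  rw [solve_char, solve_alt_char]
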